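-- pv_equiv track=rewrite | github.com/ZhiyinL/cs123 | final_project/detect.py | get_largest_clump
-- ===== SOURCE A (Python) =====
-- def get_largest_clump(x_coords, y_coords, margin=2):
--     if len(x_coords) != len(y_coords):
--         raise ValueError("x_coords and y_coords must have the same length")
--
--     # Combine and sort the coordinates based on x_coords
--     sorted_pairs = sorted(zip(x_coords, y_coords), key=lambda pair: pair[0])
--     sorted_x, sorted_y = zip(*sorted_pairs)
--     sorted_x = list(sorted_x)
--     sorted_y = list(sorted_y)
--
--     # Initialize variables to track the largest clump
--     max_clump = []
--     max_y = []
--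
--     # Initialize the first clump
--     current_clump = [sorted_x[0]]
--     current_y = [sorted_y[0]]
--
--     # Iterate through the sorted coordinates to find clumps
--     for i in range(1, len(sorted_x)):
--         if sorted_x[i] - sorted_x[i-1] <= margin:
--             # Continue the current clump
--             current_clump.append(sorted_x[i])
--             current_y.append(sorted_y[i])
--         else:
--             # Check if the current clump is the largest so far
--             if len(current_clump) > len(max_clump):
--                 max_clump = current_clump
--                 max_y = current_y
--             # Start a new clump
--             current_clump = [sorted_x[i]]
--             current_y = [sorted_y[i]]
--
--     # After the loop, check the last clump
--     if len(current_clump) > len(max_clump):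
--         max_clump = current_clump
--         max_y = current_y
--
--     return max_clump, max_y
-- ===== SOURCE B (Python) =====
-- def get_largest_clump(x_coords, y_coords, margin=2):
--     if len(x_coords) != len(y_coords):
--         raise ValueError("x_coords and y_coords must have the same length")
--     pairs = sorted(zip(x_coords, y_coords), key=lambda p: p[0])
--     # Label each point with its cluster id = number of gaps > margin to its left.
--     labels = []
--     lab = 0
--     prev = None
--     for x, _ in pairs:
--         if prev is not None and x - prev > margin:
--             lab += 1
--         labels.append(lab)
--         prev = x
--     # Histogram of cluster sizes, keyed by cluster id.
--     counts = {}
--     for l in labels: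
--         counts[l] = counts.get(l, 0) + 1
--     best = max(counts, key=lambda l: counts[l])  # first (= leftmost) largest cluster
--     return ([x for (x, _), l in zip(pairs, labels) if l == best],
--             [y for (_, y), l in zip(pairs, labels) if l == best])
-- ===== Notes on version B (the rewrite author's own statement) =====
-- stated objective: alternative
-- what changed: B labels each x-sorted point with a cluster id in one pass, builds a dict histogram of cluster sizes, picks the id of maximal count (first on ties) and filters the points carrying that id, instead of A's single scan that grows a current-clump list while maintaining running-best clump lists.
import Mathlib
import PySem

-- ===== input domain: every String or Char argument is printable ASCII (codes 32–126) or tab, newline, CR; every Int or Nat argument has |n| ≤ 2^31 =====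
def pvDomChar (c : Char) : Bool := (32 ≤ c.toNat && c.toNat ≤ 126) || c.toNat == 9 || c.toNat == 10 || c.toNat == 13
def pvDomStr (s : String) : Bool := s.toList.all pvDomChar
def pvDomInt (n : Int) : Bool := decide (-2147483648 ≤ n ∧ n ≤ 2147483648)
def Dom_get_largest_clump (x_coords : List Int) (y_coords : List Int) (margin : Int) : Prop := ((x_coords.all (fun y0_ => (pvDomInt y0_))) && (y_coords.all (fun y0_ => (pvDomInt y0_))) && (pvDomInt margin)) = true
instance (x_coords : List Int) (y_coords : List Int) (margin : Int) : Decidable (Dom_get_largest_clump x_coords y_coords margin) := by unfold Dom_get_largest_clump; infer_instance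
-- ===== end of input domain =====

-- B labels each x-sorted point with a cluster id, histograms the cluster sizes in a dict,
-- picks the id with the largest count (first on ties) and filters the points with that id,
-- instead of A's single scan maintaining current/best clump lists (objective: alternative).


-- ===== PORT A =====
-- A's for-loop over i in range(1, n): structural recursion over the remaining sorted pairs,
-- carrying sorted_x[i-1] as `prev` and A's four list variables (max_clump, max_y,
-- current_clump, current_y) as state; the trailing "check the last clump" is the base case.
def aLoop (margin : Int) (prev : Int) (maxc maxy cur cury : List Int) :
    List (Int × Int) → List Int × List Int
  | [] => if cur.length > maxc.length then (cur, cury) else (maxc, maxy)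
  | (x, y) :: rest =>
      if x - prev ≤ margin then
        aLoop margin x maxc maxy (cur ++ [x]) (cury ++ [y]) rest
      else
        if cur.length > maxc.length then
          aLoop margin x cur cury [x] [y] rest
        else
          aLoop margin x maxc maxy [x] [y] rest

def get_largest_clump (x_coords : List Int) (y_coords : List Int) (margin : Int) : List Int × List Int :=
  match PySem.List.sorted (x_coords.zip y_coords) (fun p => p.1) false with
  | [] => ([], [])   -- Python raises here (zip(*[]) unpacking ValueError); excluded by Pre_
  | (x, y) :: rest => aLoop margin x [] [] [x] [y] rest

-- ===== PORT B =====
-- Source B's labelling loop over the sorted pairs, carrying `prev` (None before the first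
-- point) and the running cluster id `lab`.
def bLabels (margin : Int) (prev : Option Int) (lab : Int) : List (Int × Int) → List Int
  | [] => []
  | (x, _) :: rest =>
      let lab' := match prev with
        | none => lab
        | some p => if x - p > margin then lab + 1 else lab
      lab' :: bLabels margin (some x) lab' rest

def get_largest_clump_alt (x_coords : List Int) (y_coords : List Int) (margin : Int) : List Int × List Int :=
  let pairs := PySem.List.sorted (x_coords.zip y_coords) (fun p => p.1) false
  let labels := bLabels margin none 0 pairs
  let counts := labels.foldl (fun d l => d.insert l (d.getD l 0 + 1))
    (PySem.Dict.empty : PySem.Dict Int Int)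
  match PySem.List.max? counts.keys (fun l => counts.getD l 0) with
  | none => ([], [])   -- Python's max over the empty dict raises ValueError; excluded by Pre_
  | some best =>
      (((pairs.zip labels).filter (fun pl => pl.2 == best)).map (fun pl => pl.1.1),
       ((pairs.zip labels).filter (fun pl => pl.2 == best)).map (fun pl => pl.1.2))

-- ===== PRECONDITION & SPEC =====
-- A raises ValueError when the lengths differ, and an unpacking ValueError on empty input.
def Pre_get_largest_clump (x_coords : List Int) (y_coords : List Int) (margin : Int) : Prop :=
  x_coords.length = y_coords.length ∧ x_coords ≠ []
instance (x_coords : List Int) (y_coords : List Int) (margin : Int) : Decidable (Pre_get_largest_clump x_coords y_coords margin) := by unfold Pre_get_largest_clump; infer_instance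

def pvWitness_get_largest_clump : List Int × List Int × Int := ([3, 1, 9, 2], [10, 20, 30, 40], 2)

def Spec_get_largest_clump (x_coords : List Int) (y_coords : List Int) (margin : Int) (out : List Int × List Int) : Prop := out = get_largest_clump_alt x_coords y_coords margin
instance (x_coords : List Int) (y_coords : List Int) (margin : Int) (out : List Int × List Int) : Decidable (Spec_get_largest_clump x_coords y_coords margin out) := by unfold Spec_get_largest_clump; infer_instance

-- ===== CLAIM (what is proved, stated in full; the proofs are below) =====
def Claim_equal_get_largest_clump : Prop := ∀ (x_coords : List Int) (y_coords : List Int) (margin : Int), Dom_get_largest_clump x_coords y_coords margin → Pre_get_largest_clump x_coords y_coords margin → Spec_get_largest_clump x_coords y_coords margin (get_largest_clump x_coords y_coords margin)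

-- ===== LEMMAS AND PROOFS =====

-- The maximal prefix continuing the clump whose last x is `prev`, and the remainder.
def takeClump (margin : Int) (prev : Int) : List (Int × Int) → List (Int × Int) × List (Int × Int)
  | [] => ([], [])
  | (x, y) :: rest =>
      if x - prev ≤ margin then
        ((x, y) :: (takeClump margin x rest).1, (takeClump margin x rest).2)
      else ([], (x, y) :: rest)

theorem takeClump_snd_length_le (margin prev : Int) (ps : List (Int × Int)) :
    (takeClump margin prev ps).2.length ≤ ps.length := by
  induction ps generalizing prev with
  | nil => simp [takeClump]
  | cons p rest ih =>
      obtain ⟨x, y⟩ := p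
      simp only [takeClump]
      split
      · simpa using Nat.le_succ_of_le (ih x)
      · simp

-- The partition of the sorted pairs into maximal clumps.
def clumps (margin : Int) : List (Int × Int) → List (List (Int × Int))
  | [] => []
  | (x, y) :: rest =>
      ((x, y) :: (takeClump margin x rest).1) :: clumps margin (takeClump margin x rest).2
  termination_by ps => ps.length
  decreasing_by
    simp only [List.length_cons]
    exact Nat.lt_succ_of_le (takeClump_snd_length_le _ _ _)

theorem clumps_nil (margin : Int) : clumps margin [] = [] := by simp [clumps]

theorem clumps_cons (margin x y : Int) (rest : List (Int × Int)) :
    clumps margin ((x, y) :: rest) =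
      ((x, y) :: (takeClump margin x rest).1) :: clumps margin (takeClump margin x rest).2 := by
  rw [clumps]

theorem takeClump_append (margin prev : Int) (ps : List (Int × Int)) :
    (takeClump margin prev ps).1 ++ (takeClump margin prev ps).2 = ps := by
  induction ps generalizing prev with
  | nil => simp [takeClump]
  | cons p rest ih =>
      obtain ⟨x, y⟩ := p
      simp only [takeClump]
      split
      · simpa using ih x
      · simp

theorem clumps_flatten (margin : Int) (ps : List (Int × Int)) :
    (clumps margin ps).flatten = ps := by
  induction hn : ps.length using Nat.strong_induction_on generalizing ps with
  | _ n ih =>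
      cases ps with
      | nil => simp [clumps_nil]
      | cons p rest =>
          obtain ⟨x, y⟩ := p
          rw [clumps_cons]
          have hlt : (takeClump margin x rest).2.length < n := by
            subst hn
            exact Nat.lt_succ_of_le (by simpa using takeClump_snd_length_le margin x rest)
          simp only [List.flatten_cons, ih _ hlt _ rfl]
          simp [takeClump_append]

theorem clumps_ne_nil (margin : Int) (ps : List (Int × Int)) :
    ∀ g ∈ clumps margin ps, g ≠ [] := by
  induction hn : ps.length using Nat.strong_induction_on generalizing ps with
  | _ n ih =>
      cases ps with
      | nil => simp [clumps_nil]
      | cons p rest =>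
          obtain ⟨x, y⟩ := p
          rw [clumps_cons]
          intro g hg
          rcases List.mem_cons.mp hg with h | h
          · subst h; simp
          · have hlt : (takeClump margin x rest).2.length < n := by
              subst hn
              exact Nat.lt_succ_of_le (by simpa using takeClump_snd_length_le margin x rest)
            exact ih _ hlt _ rfl g h

-- The label sequence of a clump partition: |g₀| copies of lab, |g₁| copies of lab+1, …
def labsOf (lab : Int) : List (List (Int × Int)) → List Int
  | [] => []
  | g :: gs => List.replicate g.length lab ++ labsOf (lab + 1) gs

-- The distinct cluster ids lab, lab+1, …, one per group.
def labelIds (lab : Int) : List (List (Int × Int)) → List Int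
  | [] => []
  | _ :: gs => lab :: labelIds (lab + 1) gs

-- The group carrying a given id.
def groupAt (L lab : Int) : List (List (Int × Int)) → List (Int × Int)
  | [] => []
  | g :: gs => if L = lab then g else groupAt L (lab + 1) gs

-- Source B's label loop restarted at the head of a clump-remainder.
def bStart (margin lab : Int) : List (Int × Int) → List Int
  | [] => []
  | (x, _) :: rest => lab :: bLabels margin (some x) lab rest

theorem bLabels_takeClump (margin : Int) (ps : List (Int × Int)) :
    ∀ (p lab : Int), bLabels margin (some p) lab ps =
      List.replicate (takeClump margin p ps).1.length lab ++
        bStart margin (lab + 1) (takeClump margin p ps).2 := by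
  induction ps with
  | nil => intro p lab; simp [bLabels, takeClump, bStart]
  | cons q rest ih =>
      intro p lab
      obtain ⟨x, y⟩ := q
      by_cases hle : x - p ≤ margin
      · have hgt : ¬ (x - p > margin) := by omega
        simp only [bLabels, takeClump, if_pos hle, if_neg hgt, List.length_cons,
          List.replicate_succ, List.cons_append]
        rw [ih x lab]
      · have hgt : x - p > margin := by omega
        simp only [bLabels, takeClump, if_neg hle, if_pos hgt, List.length_nil,
          List.replicate_zero, List.nil_append, bStart]

theorem bStart_eq_labsOf (margin : Int) (ps : List (Int × Int)) :
    ∀ lab, bStart margin lab ps = labsOf lab (clumps margin ps) := by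
  induction hn : ps.length using Nat.strong_induction_on generalizing ps with
  | _ n ih =>
      cases ps with
      | nil => intro lab; simp [bStart, clumps_nil, labsOf]
      | cons q rest =>
          obtain ⟨x, y⟩ := q
          intro lab
          have hlt : (takeClump margin x rest).2.length < n := by
            subst hn
            exact Nat.lt_succ_of_le (by simpa using takeClump_snd_length_le margin x rest)
          rw [clumps_cons]
          show lab :: bLabels margin (some x) lab rest = _
          rw [bLabels_takeClump, ih _ hlt _ rfl]
          simp [labsOf, List.replicate_succ]

theorem mem_labsOf_le (gs : List (List (Int × Int))) :
    ∀ (lab l : Int), l ∈ labsOf lab gs → lab ≤ l := by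
  induction gs with
  | nil => intro lab l h; simp [labsOf] at h
  | cons g gs ih =>
      intro lab l h
      simp only [labsOf, List.mem_append, List.mem_replicate] at h
      rcases h with ⟨_, h⟩ | h
      · omega
      · have := ih (lab + 1) l h; omega

theorem mem_labelIds_le (gs : List (List (Int × Int))) :
    ∀ (lab l : Int), l ∈ labelIds lab gs → lab ≤ l := by
  induction gs with
  | nil => intro lab l h; simp [labelIds] at h
  | cons g gs ih =>
      intro lab l h
      simp only [labelIds, List.mem_cons] at h
      rcases h with h | h
      · omega
      · have := ih (lab + 1) l h; omega

theorem foldl_add_replicate_mem (lab : Int) (n : Nat) (s : List Int) (h : lab ∈ s) :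
    List.foldl PySem.Set.add s (List.replicate n lab) = s := by
  induction n with
  | zero => simp
  | succ n ih =>
      have hc : PySem.Set.add s lab = s := by
        simp [PySem.Set.add, PySem.Set.contains, h]
      simp [List.replicate_succ, hc, ih]

theorem foldl_add_labsOf (gs : List (List (Int × Int))) :
    ∀ (lab : Int) (s : List Int), (∀ i ∈ s, i < lab) → (∀ g ∈ gs, g ≠ []) →
      List.foldl PySem.Set.add s (labsOf lab gs) = s ++ labelIds lab gs := by
  induction gs with
  | nil => intro lab s _ _; simp [labsOf, labelIds]
  | cons g gs ih =>
      intro lab s hs hne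
      obtain ⟨a, g', rfl⟩ := List.exists_cons_of_ne_nil (hne g (by simp))
      have hnot : lab ∉ s := fun h => absurd (hs lab h) (by omega)
      have hadd : PySem.Set.add s lab = s ++ [lab] := by
        simp only [PySem.Set.add, PySem.Set.contains]
        rw [if_neg (by simpa [List.elem_iff] using hnot)]
      simp only [labsOf, List.foldl_append, List.length_cons, List.replicate_succ,
        List.foldl_cons, hadd]
      rw [foldl_add_replicate_mem lab g'.length (s ++ [lab]) (by simp)]
      rw [ih (lab + 1) (s ++ [lab]) (by intro i hi; rcases List.mem_append.mp hi with h | h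
                                        · have := hs i h; omega
                                        · simp at h; omega)
            (fun g hg => hne g (by simp [hg]))]
      simp [labelIds]

theorem ofList_labsOf (gs : List (List (Int × Int))) (lab : Int)
    (hne : ∀ g ∈ gs, g ≠ []) :
    PySem.Set.ofList (labsOf lab gs) = labelIds lab gs := by
  have := foldl_add_labsOf gs lab [] (by simp) hne
  simpa [PySem.Set.ofList, PySem.Set.empty] using this

theorem count_labsOf (gs : List (List (Int × Int))) :
    ∀ (lab l : Int), lab ≤ l →
      List.count l (labsOf lab gs) = (groupAt l lab gs).length := by
  induction gs with
  | nil => intro lab l _; simp [labsOf, groupAt]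
  | cons g gs ih =>
      intro lab l hle
      simp only [labsOf, List.count_append, List.count_replicate, groupAt]
      by_cases h : l = lab
      · subst h
        have h0 : List.count l (labsOf (l + 1) gs) = 0 := by
          rw [List.count_eq_zero]
          intro hmem
          have := mem_labsOf_le gs (l + 1) l hmem
          omega
        simp [h0]
      · have hbeq : ¬ ((lab == l) = true) := by simpa using fun hcon => h hcon.symm
        rw [if_neg hbeq, if_neg h]
        simpa using ih (lab + 1) l (by omega)

theorem zip_replicate_label (g : List (Int × Int)) (lab : Int) :
    g.zip (List.replicate g.length lab) = g.map (fun p => (p, lab)) := by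
  induction g with
  | nil => simp
  | cons p g ih => simp [List.replicate_succ, ih]

theorem filter_labsOf (gs : List (List (Int × Int))) :
    ∀ (lab L : Int), lab ≤ L →
      (gs.flatten.zip (labsOf lab gs)).filter (fun pl => pl.2 == L) =
        (groupAt L lab gs).map (fun p => (p, L)) := by
  induction gs with
  | nil => intro lab L _; simp [labsOf, groupAt]
  | cons g gs ih =>
      intro lab L hle
      simp only [labsOf, List.flatten_cons, groupAt]
      rw [List.zip_append (by simp), List.filter_append, zip_replicate_label]
      by_cases h : L = lab
      · subst h
        have h2 : (gs.flatten.zip (labsOf (L + 1) gs)).filter (fun pl => pl.2 == L) = [] := by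
          rw [List.filter_eq_nil_iff]
          intro pl hmem
          have hsnd : pl.2 ∈ labsOf (L + 1) gs := (List.of_mem_zip hmem).2
          have := mem_labsOf_le gs (L + 1) pl.2 hsnd
          simp only [beq_iff_eq]
          omega
        have h1 : (g.map (fun p => (p, L))).filter (fun pl => pl.2 == L) =
            g.map (fun p => (p, L)) := by
          rw [List.filter_eq_self]
          intro pl hmem
          simp only [List.mem_map] at hmem
          obtain ⟨p, _, rfl⟩ := hmem
          simp
        simp [h1, h2]
      · have h1 : (g.map (fun p => (p, lab))).filter (fun pl => pl.2 == L) = [] := by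
          rw [List.filter_eq_nil_iff]
          intro pl hmem
          simp only [List.mem_map] at hmem
          obtain ⟨p, _, rfl⟩ := hmem
          simpa using fun hcon => h hcon.symm
        rw [h1, if_neg h]
        simpa using ih (lab + 1) L (by omega)

-- A-side characterisation: A's running-max loop picks the first longest clump.
def bestFold (b : List (Int × Int)) (gs : List (List (Int × Int))) : List (Int × Int) :=
  gs.foldl (fun b g => if g.length > b.length then g else b) b

theorem bestFold_cons (b g : List (Int × Int)) (gs : List (List (Int × Int))) :
    bestFold b (g :: gs) = bestFold (if g.length > b.length then g else b) gs := rfl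

theorem aLoop_eq_bestFold (margin : Int) (ps : List (Int × Int)) :
    ∀ (prev : Int) (maxg c : List (Int × Int)),
    aLoop margin prev (maxg.map Prod.fst) (maxg.map Prod.snd)
        (c.map Prod.fst) (c.map Prod.snd) ps =
      (let best := bestFold maxg
          ((c ++ (takeClump margin prev ps).1) :: clumps margin (takeClump margin prev ps).2)
       (best.map Prod.fst, best.map Prod.snd)) := by
  induction ps with
  | nil =>
      intro prev maxg c
      simp only [aLoop, takeClump, clumps_nil, List.append_nil, bestFold, List.foldl,
        List.length_map]
      split <;> rfl
  | cons p rest ih =>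
      intro prev maxg c
      obtain ⟨x, y⟩ := p
      simp only [aLoop, takeClump]
      by_cases hle : x - prev ≤ margin
      · rw [if_pos hle, if_pos hle]
        have hc : (c.map Prod.fst) ++ [x] = (c ++ [(x, y)]).map Prod.fst := by simp
        have hcy : (c.map Prod.snd) ++ [y] = (c ++ [(x, y)]).map Prod.snd := by simp
        rw [hc, hcy, ih x maxg (c ++ [(x, y)])]
        simp [List.append_assoc]
      · rw [if_neg hle, if_neg hle]
        rw [List.append_nil, clumps_cons, bestFold_cons]
        have h1 : ([x] : List Int) = [((x : Int), (y : Int))].map Prod.fst := by simp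
        have h2 : ([y] : List Int) = [((x : Int), (y : Int))].map Prod.snd := by simp
        simp only [List.length_map]
        split <;> rename_i hlen
        · rw [h1, h2, ih x c [(x, y)]]
          simp
        · rw [h1, h2, ih x maxg [(x, y)]]
          simp

-- B-side: Python's max (first maximum) peeled one element at a time.
theorem max?_cons_cons (K : Int → Int) (a bx : Int) (t : List Int) :
    PySem.List.max? (a :: bx :: t) K =
      if K a < K bx then PySem.List.max? (bx :: t) K else PySem.List.max? (a :: t) K := by
  simp only [PySem.List.max?, List.foldl_cons]
  split <;> rfl

-- The first-max over the cluster ids selects exactly A's first longest clump.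
theorem maxfold_eq_bestFold (K : Int → Int) (gs1 : List (List (Int × Int))) :
    ∀ (lab bl : Int) (b : List (Int × Int)), bl < lab →
    K bl = (b.length : Int) →
    (∀ l ∈ labelIds lab gs1, K l = ((groupAt l lab gs1).length : Int)) →
    ∃ L, PySem.List.max? (bl :: labelIds lab gs1) K = some L ∧
      (L = bl ∨ lab ≤ L) ∧
      (if L = bl then b else groupAt L lab gs1) = bestFold b gs1 := by
  induction gs1 with
  | nil =>
      intro lab bl b hbl hK _
      exact ⟨bl, rfl, Or.inl rfl, by simp [bestFold]⟩
  | cons g gs ih =>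
      intro lab bl b hbl hK hall
      have hKlab : K lab = (g.length : Int) := by
        have := hall lab (by simp [labelIds])
        simpa [groupAt] using this
      have hall' : ∀ l ∈ labelIds (lab + 1) gs, K l = ((groupAt l (lab + 1) gs).length : Int) := by
        intro l hl
        have hge := mem_labelIds_le gs (lab + 1) l hl
        have := hall l (by simp [labelIds, hl])
        rwa [groupAt, if_neg (by omega)] at this
      have hpeel : labelIds lab (g :: gs) = lab :: labelIds (lab + 1) gs := rfl
      rw [hpeel, max?_cons_cons]
      by_cases hcmp : K bl < K lab
      · -- update: the new clump is strictly longer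
        have hlen : g.length > b.length := by
          rw [hK, hKlab] at hcmp; exact_mod_cast hcmp
        obtain ⟨L, hfold, hor, hgrp⟩ := ih (lab + 1) lab g (by omega) hKlab hall'
        refine ⟨L, by rwa [if_pos hcmp], ?_, ?_⟩
        · rcases hor with h | h
          · exact Or.inr (by omega)
          · exact Or.inr (by omega)
        · have hLne : L ≠ bl := by rcases hor with h | h <;> omega
          rw [if_neg hLne, bestFold_cons, if_pos hlen, groupAt]
          by_cases hLlab : L = lab
          · rw [if_pos hLlab]
            rwa [if_pos hLlab] at hgrp
          · rw [if_neg hLlab]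
            rwa [if_neg hLlab] at hgrp
      · -- no-update: keep the current best
        have hlen : ¬ (g.length > b.length) := by
          rw [hK, hKlab] at hcmp
          intro hcon
          exact hcmp (by exact_mod_cast hcon)
        obtain ⟨L, hfold, hor, hgrp⟩ := ih (lab + 1) bl b (by omega) hK hall'
        refine ⟨L, by rwa [if_neg hcmp], ?_, ?_⟩
        · rcases hor with h | h
          · exact Or.inl h
          · exact Or.inr (by omega)
        · rw [bestFold_cons, if_neg hlen]
          by_cases hLbl : L = bl
          · rw [if_pos hLbl]
            rwa [if_pos hLbl] at hgrp
          · have hge : lab + 1 ≤ L := by rcases hor with h | h <;> omega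
            rw [if_neg hLbl, groupAt, if_neg (by omega)]
            rw [if_neg hLbl] at hgrp
            exact hgrp

-- ===== VERDICT (by name: the statement is the Claim_ definition above) =====
theorem get_largest_clump_spec : Claim_equal_get_largest_clump := by
  intro xs ys margin _ hpre
  unfold Spec_get_largest_clump
  obtain ⟨hlen, hne⟩ := hpre
  have hz : xs.zip ys ≠ [] := by
    cases xs with
    | nil => exact absurd rfl hne
    | cons a as =>
        cases ys with
        | nil => simp at hlen
        | cons b bs => simp [List.zip]
  have hs : PySem.List.sorted (xs.zip ys) (fun p => p.1) false ≠ [] := by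
    simpa [PySem.List.sorted_eq_nil_iff] using hz
  obtain ⟨⟨x, y⟩, rest, hcons⟩ := List.exists_cons_of_ne_nil hs
  -- abbreviations for the clump partition of the sorted list
  set tk := takeClump margin x rest with htk
  set g0 : List (Int × Int) := (x, y) :: tk.1 with hg0
  set gs1 := clumps margin tk.2 with hgs1
  have hclumps : clumps margin ((x, y) :: rest) = g0 :: gs1 := by
    rw [clumps_cons]
  have hgne : ∀ g ∈ g0 :: gs1, g ≠ [] := by
    rw [← hclumps]; exact clumps_ne_nil margin ((x, y) :: rest)
  -- A's value
  have hA : get_largest_clump xs ys margin =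
      ((bestFold g0 gs1).map Prod.fst, (bestFold g0 gs1).map Prod.snd) := by
    unfold get_largest_clump
    rw [hcons]
    show aLoop margin x [] [] [x] [y] rest = _
    have hmain := aLoop_eq_bestFold margin rest x [] [(x, y)]
    simp only [List.map_nil, List.map_cons] at hmain
    rw [hmain]
    simp only [List.singleton_append, ← htk, ← hg0, ← hgs1, bestFold_cons]
    rw [if_pos (show g0.length > List.length ([] : List (Int × Int)) by simp [hg0])]
  -- B's ingredients
  have hlabels : bLabels margin none 0 ((x, y) :: rest) = labsOf 0 (g0 :: gs1) := by
    have : bLabels margin none 0 ((x, y) :: rest) = bStart margin 0 ((x, y) :: rest) := by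
      simp [bLabels, bStart]
    rw [this, bStart_eq_labsOf, hclumps]
  have hcounter : (bLabels margin none 0 ((x, y) :: rest)).foldl
      (fun d l => d.insert l (d.getD l 0 + 1)) PySem.Dict.empty =
      PySem.Dict.counter (labsOf 0 (g0 :: gs1)) := by
    rw [hlabels, PySem.Dict.foldl_insert_getD_add_one_eq_counter]
  have hkeys : (PySem.Dict.counter (labsOf 0 (g0 :: gs1))).keys = labelIds 0 (g0 :: gs1) := by
    rw [PySem.Dict.keys_counter, ofList_labsOf _ _ hgne]
  -- the key function is the clump length
  set K : Int → Int := fun l => (PySem.Dict.counter (labsOf 0 (g0 :: gs1))).getD l 0 with hKdef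
  have hKeq : ∀ l : Int, 0 ≤ l → K l = ((groupAt l 0 (g0 :: gs1)).length : Int) := by
    intro l hl
    rw [hKdef]
    simp only [PySem.Dict.getD_counter]
    rw [count_labsOf _ 0 l hl]
  have hK0 : K 0 = (g0.length : Int) := by
    have := hKeq 0 le_rfl
    simpa [groupAt] using this
  have hall : ∀ l ∈ labelIds 1 gs1, K l = ((groupAt l 1 gs1).length : Int) := by
    intro l hl
    have hge := mem_labelIds_le gs1 1 l hl
    have := hKeq l (by omega)
    rwa [groupAt, if_neg (by omega)] at this
  obtain ⟨L, hfold, hor, hgrp⟩ :=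
    maxfold_eq_bestFold K gs1 1 0 g0 (by omega) hK0 hall
  have hmax : PySem.List.max? (labelIds 0 (g0 :: gs1)) K = some L := by
    have hpeel : labelIds 0 (g0 :: gs1) = (0 : Int) :: labelIds 1 gs1 := by
      show (0 : Int) :: labelIds (0 + 1) gs1 = (0 : Int) :: labelIds 1 gs1
      norm_num
    rw [hpeel]
    exact hfold
  have hL0 : 0 ≤ L := by rcases hor with h | h <;> omega
  -- the filter picks out the selected clump
  have hflat : (g0 :: gs1).flatten = (x, y) :: rest := by
    rw [← hclumps]; exact clumps_flatten margin ((x, y) :: rest)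
  have hfilter : (((x, y) :: rest).zip (labsOf 0 (g0 :: gs1))).filter
      (fun pl => pl.2 == L) = (groupAt L 0 (g0 :: gs1)).map (fun p => (p, L)) := by
    rw [← hflat]
    exact filter_labsOf (g0 :: gs1) 0 L hL0
  have hsel : groupAt L 0 (g0 :: gs1) = bestFold g0 gs1 := by
    have hgA : groupAt L 0 (g0 :: gs1) = if L = 0 then g0 else groupAt L (0 + 1) gs1 := rfl
    rw [hgA, zero_add]
    exact hgrp
  -- assemble B's value
  unfold get_largest_clump_alt
  simp only [hcons]
  rw [hlabels]
  simp only [PySem.Dict.foldl_insert_getD_add_one_eq_counter]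
  rw [← hKdef, hkeys, hmax]
  rw [hA, ← hsel]
  simp [hfilter, List.map_map, Function.comp]
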